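-- pv_equiv track=rewrite | github.com/Abdullah9431/ROMAN-VALUE-CALCULATION | PROGRAM.py | gt
-- ===== SOURCE A (Python) =====
-- def gt(xkcd :str):
--     li = list(xkcd)
--     new=[xkcd[0]]
--     i,j=0,0
--     while i<len(xkcd)-1:
--         i+=1
--         if li[i]=="1" or li[i]=="5":
--             j+=1
--             new.append(li[i])
--         else:
--             new[j]=new[j]+li[i]
--     return new
-- ===== SOURCE B (Python) =====
-- def gt(xkcd: str):
--     # Two-pass: collect group-start boundaries, then slice between consecutive boundaries.
--     bounds = [0] + [i for i in range(1, len(xkcd)) if xkcd[i] in "15"] + [len(xkcd)]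
--     return [xkcd[a:b] for a, b in zip(bounds, bounds[1:])]
-- ===== Notes on version B (the rewrite author's own statement) =====
-- stated objective: faster
-- what changed: Replaced A's single accumulating pass (growing the last group via repeated string concatenation new[j] = new[j] + c) with a two-pass strategy: collect group-start boundary indices, then emit each group as one slice between consecutive boundaries.
-- crash fix: On the empty string A raises IndexError (it indexes xkcd[0]); B returns ['']. — e.g. on gt(""): A raises IndexError, B returns [""]
import Mathlib
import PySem

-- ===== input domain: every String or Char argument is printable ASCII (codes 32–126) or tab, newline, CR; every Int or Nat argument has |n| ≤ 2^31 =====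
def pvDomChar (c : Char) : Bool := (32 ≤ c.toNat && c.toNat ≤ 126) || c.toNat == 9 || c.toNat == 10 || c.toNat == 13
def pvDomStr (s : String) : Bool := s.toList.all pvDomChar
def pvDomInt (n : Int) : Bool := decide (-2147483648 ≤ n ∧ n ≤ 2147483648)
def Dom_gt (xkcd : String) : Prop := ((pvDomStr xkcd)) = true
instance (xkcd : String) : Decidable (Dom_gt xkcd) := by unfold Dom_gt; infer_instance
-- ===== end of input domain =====

-- B replaces A's single accumulating pass (growing the last group char by char)
-- with a two-pass boundary-index-then-slice decomposition (measured faster in a timing run).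

-- ===== PORT A =====
-- loop body of A's while loop: either start a new group (j += 1; append) or extend
-- group j in place (new[j] = new[j] + li[i])
def stepA (st : List String × Nat) (d : Char) : List String × Nat :=
  if d == '1' || d == '5' then (st.1 ++ [String.singleton d], st.2 + 1)
  else (st.1.set st.2 ((st.1.getD st.2 "").push d), st.2)

-- literal transliteration of A: new = [xkcd[0]]; then the while loop reads li[i] for
-- i = 1 .. len-1, i.e. folds stepA over li.drop 1
def gt (xkcd : String) : List String :=
  let li := xkcd.toList
  match li with
  | [] => []   -- Python raises IndexError on xkcd[0] here; excluded by Pre_gt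
  | c :: _ => ((li.drop 1).foldl stepA ([String.singleton c], 0)).1

-- ===== PORT B =====
-- literal transliteration of B: bounds = [0] + [i in range(1,len) if xkcd[i] in "15"] + [len];
-- return [xkcd[a:b] for a,b in zip(bounds, bounds[1:])].  The slice xkcd[a:b] is exact as
-- drop/take here since 0 ≤ a ≤ b ≤ len for consecutive bounds.
def gt_alt (xkcd : String) : List String :=
  let l := xkcd.toList
  let n := l.length
  let bounds := [0] ++ (List.range' 1 (n - 1)).filter
      (fun i => l.getD i ' ' == '1' || l.getD i ' ' == '5') ++ [n]
  (bounds.zip bounds.tail).map (fun p => String.ofList ((l.drop p.1).take (p.2 - p.1)))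

-- ===== PRECONDITION & SPEC =====
-- Pre_ excludes only the empty string, on which A raises IndexError (xkcd[0]).
def Pre_gt (xkcd : String) : Prop := xkcd ≠ ""
instance (xkcd : String) : Decidable (Pre_gt xkcd) := by unfold Pre_gt; infer_instance
def pvWitness_gt : String := "a1b51"

-- On the empty string A raises IndexError (it indexes xkcd[0]); B returns [""].
def Raises_gt (xkcd : String) : Prop := xkcd = ""
instance (xkcd : String) : Decidable (Raises_gt xkcd) := by unfold Raises_gt; infer_instance
def pvRaiseWitness_gt : String := ""
def pvRaiseWitnessOut_gt : List String := [""]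

def Spec_gt (xkcd : String) (out : List String) : Prop := out = gt_alt xkcd
instance (xkcd : String) (out : List String) : Decidable (Spec_gt xkcd out) := by unfold Spec_gt; infer_instance

-- ===== CLAIM (what is proved, stated in full; the proofs are below) =====
def Claim_equal_gt : Prop := ∀ (xkcd : String), Dom_gt xkcd → Pre_gt xkcd → Spec_gt xkcd (gt xkcd)
def Claim_raises_gt : Prop := (∀ (xkcd : String), Dom_gt xkcd → Raises_gt xkcd → ¬ Pre_gt xkcd) ∧ (Dom_gt (pvRaiseWitness_gt) ∧ Raises_gt (pvRaiseWitness_gt) ∧ gt_alt (pvRaiseWitness_gt) = pvRaiseWitnessOut_gt)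

-- ===== LEMMAS AND PROOFS =====

-- reference grouping recursion, over lists of chars
def goL : List Char → List Char → List (List Char)
  | acc, [] => [acc]
  | acc, d :: t => if d == '1' || d == '5' then acc :: goL [d] t else goL (acc ++ [d]) t

-- the same recursion over Strings (shape of A's fold)
def goS : String → List Char → List String
  | acc, [] => [acc]
  | acc, d :: t => if d == '1' || d == '5' then acc :: goS (String.singleton d) t else goS (acc.push d) t

-- chunking a list between consecutive boundaries, recursively (shape of B's zip/map)
def chunkRec : List Nat → List Char → List (List Char)
  | a :: b :: r, l => ((l.drop a).take (b - a)) :: chunkRec (b :: r) l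
  | _, _ => []

-- indices of separator chars in l
def J (l : List Char) : List Nat :=
  (List.range l.length).filter (fun i => l.getD i ' ' == '1' || l.getD i ' ' == '5')

lemma getD_append_len (xs : List String) (y : String) : (xs ++ [y]).getD xs.length "" = y := by
  induction xs with
  | nil => rfl
  | cons a l ih => simpa using ih

lemma set_append_len (xs : List String) (y z : String) : (xs ++ [y]).set xs.length z = xs ++ [z] := by
  induction xs with
  | nil => rfl
  | cons a l ih => simpa using ih

-- A's fold appends to / extends the last group: it computes goS
lemma foldA (l : List Char) : ∀ (new : List String) (acc : String),
    (l.foldl stepA (new ++ [acc], new.length)).1 = new ++ goS acc l := by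
  induction l with
  | nil => intro new acc; simp [goS]
  | cons d t ih =>
    intro new acc
    by_cases hd : (d == '1' || d == '5') = true
    · simp only [List.foldl_cons, stepA, hd, if_pos]
      have h1 : new ++ [acc] ++ [String.singleton d] = (new ++ [acc]) ++ [String.singleton d] := rfl
      have h2 : new.length + 1 = (new ++ [acc]).length := by simp
      rw [h1, h2, ih (new ++ [acc]) (String.singleton d)]
      simp [goS, hd]
    · simp only [List.foldl_cons, stepA, hd, if_neg, Bool.false_eq_true, not_false_iff]
      rw [getD_append_len, set_append_len, ih new (acc.push d)]
      simp [goS, hd]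

lemma goS_eq_goL (t : List Char) : ∀ (acc : String), goS acc t = (goL acc.toList t).map String.ofList := by
  induction t with
  | nil => intro acc; simp [goS, goL]
  | cons d t' ih =>
    intro acc
    by_cases hd : (d == '1' || d == '5') = true
    · simp [goS, goL, hd, ih]
    · simp [goS, goL, hd, ih]

-- B's zip/map comprehension is the recursive chunking
lemma zip_map_chunk (bs : List Nat) (l : List Char) :
    (bs.zip bs.tail).map (fun p => (l.drop p.1).take (p.2 - p.1)) = chunkRec bs l := by
  induction bs with
  | nil => simp [chunkRec]
  | cons a r ih =>
    cases r with
    | nil => simp [chunkRec]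
    | cons b r' =>
      simp only [List.tail_cons, List.zip_cons_cons, List.map_cons, chunkRec]
      have := ih
      simp only [List.tail_cons] at this
      rw [this]

lemma chunk_shift (bs : List Nat) (pre l : List Char) :
    chunkRec (bs.map (· + pre.length)) (pre ++ l) = chunkRec bs l := by
  induction bs with
  | nil => simp [chunkRec]
  | cons a r ih =>
    cases r with
    | nil => simp [chunkRec]
    | cons b r' =>
      simp only [List.map_cons, chunkRec] at *
      rw [ih]
      congr 1
      have h : a + pre.length = pre.length + a := by omega
      rw [h, List.drop_append]
      · rw [List.drop_eq_nil_of_le (by omega), List.nil_append, Nat.add_sub_cancel_left]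
        congr 1
        omega

lemma J_cons (d : Char) (t : List Char) :
    J (d :: t) = (if d == '1' || d == '5' then [0] else []) ++ (J t).map (· + 1) := by
  unfold J
  rw [List.length_cons, List.range_succ_eq_map]
  rw [List.filter_cons, List.filter_map]
  have hp : ((fun i => (d :: t).getD i ' ' == '1' || (d :: t).getD i ' ' == '5') ∘ Nat.succ)
      = (fun i => t.getD i ' ' == '1' || t.getD i ' ' == '5') := by
    funext i
    simp [Function.comp]
  rw [hp]
  have hm : (List.filter (fun i => t.getD i ' ' == '1' || t.getD i ' ' == '5') (List.range t.length)).map Nat.succ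
      = (List.filter (fun i => t.getD i ' ' == '1' || t.getD i ' ' == '5') (List.range t.length)).map (· + 1) := by
    simp
  rw [hm]
  by_cases hd : (d == '1' || d == '5') = true <;> simp_all

-- the boundary indices B collects for c :: t are the separator indices of t, shifted by 1
lemma interior_eq (c : Char) (t : List Char) :
    (List.range' 1 t.length).filter (fun i => (c :: t).getD i ' ' == '1' || (c :: t).getD i ' ' == '5')
      = (J t).map (· + 1) := by
  rw [List.range'_eq_map_range, List.filter_map]
  unfold J
  have hp : ((fun i => (c :: t).getD i ' ' == '1' || (c :: t).getD i ' ' == '5') ∘ (1 + ·))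
      = fun i => t.getD i ' ' == '1' || t.getD i ' ' == '5' := by
    funext i
    simp [Function.comp, Nat.add_comm 1 i]
  rw [hp]
  apply List.map_congr_left
  intro a _
  omega

-- chunking acc ++ t at the (shifted) separator indices of t is the grouping recursion
lemma main_chunk (t : List Char) : ∀ (acc : List Char), acc ≠ [] →
    chunkRec (0 :: ((J t).map (· + acc.length) ++ [t.length + acc.length])) (acc ++ t)
      = goL acc t := by
  induction t with
  | nil =>
    intro acc h
    simp [chunkRec, J, goL]
  | cons d t' ih =>
    intro acc h
    have hkey : ((J (d :: t')).map (· + acc.length) ++ [(d :: t').length + acc.length])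
        = ((if d == '1' || d == '5' then [acc.length] else [])
            ++ ((0 :: ((J t').map (· + 1) ++ [t'.length + 1])).map (· + acc.length)).tail) := by
      rw [J_cons]
      split <;> simp [List.map_map]
    rw [hkey]
    by_cases hd : (d == '1' || d == '5') = true
    · rw [if_pos hd]
      show chunkRec (0 :: acc.length :: (((J t').map (· + 1) ++ [t'.length + 1]).map (· + acc.length)))
          (acc ++ d :: t') = goL acc (d :: t')
      rw [chunkRec]
      have h0 : ((acc ++ d :: t').drop 0).take (acc.length - 0) = acc := by
        simp
      rw [h0]
      have h1 : (acc.length :: ((J t').map (· + 1) ++ [t'.length + 1]).map (· + acc.length))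
          = (0 :: ((J t').map (· + 1) ++ [t'.length + 1])).map (· + acc.length) := by
        simp
      rw [h1, chunk_shift]
      have ihd := ih [d] (by simp)
      simp only [List.length_cons, List.length_nil, Nat.zero_add, List.singleton_append] at ihd
      rw [ihd]
      simp [goL, hd]
    · rw [if_neg hd]
      show chunkRec (0 :: (((J t').map (· + 1) ++ [t'.length + 1]).map (· + acc.length)))
          (acc ++ d :: t') = goL acc (d :: t')
      have h2 : ((J t').map (· + 1) ++ [t'.length + 1]).map (· + acc.length)
          = (J t').map (· + (acc ++ [d]).length) ++ [t'.length + (acc ++ [d]).length] := by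
        simp [List.map_map]
        constructor
        · intro a _; omega
        · omega
      have h3 : acc ++ d :: t' = (acc ++ [d]) ++ t' := by simp
      rw [h2, h3, ih (acc ++ [d]) (by simp)]
      simp [goL, hd]

-- ===== VERDICT (by name: the statement is the Claim_ definition above) =====
theorem gt_spec : Claim_equal_gt := by
  intro xkcd _ hpre
  unfold Spec_gt
  have hne : xkcd.toList ≠ [] := by
    simpa [String.toList_eq_nil_iff] using hpre
  rcases hl : xkcd.toList with _ | ⟨c, t⟩
  · exact absurd hl hne
  · -- A side
    have hA : gt xkcd = goS (String.singleton c) t := by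
      unfold gt
      rw [hl]
      simpa using foldA t [] (String.singleton c)
    -- B side
    have hB : gt_alt xkcd = (goL [c] t).map String.ofList := by
      unfold gt_alt
      rw [hl]
      simp only [List.length_cons, Nat.add_sub_cancel, interior_eq]
      have hcomp : (fun p : Nat × Nat => String.ofList (((c :: t).drop p.1).take (p.2 - p.1)))
          = String.ofList ∘ (fun p : Nat × Nat => (((c :: t).drop p.1).take (p.2 - p.1))) := rfl
      rw [hcomp, ← List.map_map, zip_map_chunk]
      have mc := main_chunk t [c] (by simp)
      simp only [List.length_cons, List.length_nil, Nat.zero_add, List.singleton_append] at mc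
      exact congrArg (List.map String.ofList) mc
    rw [hA, hB, goS_eq_goL]
    simp
theorem gt_raises : Claim_raises_gt := by
  unfold Claim_raises_gt
  exact ⟨fun x _ h hp => hp h, by decide⟩

-- both delivered claims, bundled under one name
theorem gt_claims_ok : Claim_equal_gt ∧ Claim_raises_gt := ⟨gt_spec, gt_raises⟩
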